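-- pv_equiv track=rewrite | github.com/gregology/assistant | packages/assistant-sdk/src/assistant_sdk/provenance.py | resolve_provenance
-- ===== SOURCE A (Python) =====
-- from typing import Any
--
-- def resolve_provenance(when: dict[str, Any], deterministic_sources: frozenset[str]) -> str:
--     """Derive provenance from the namespaces used in automation conditions.
--
--     Returns "rule" if all conditions reference deterministic sources,
--     "llm" if all reference classification, or "hybrid" if mixed.
--
--     deterministic_sources must be supplied by the caller from the
--     integration's own const.py -- config.py holds no integration-specific
--     knowledge about what is or isn't deterministic.
--     """
--     has_deterministic = False
--     has_nondeterministic = False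
--     for key in when:
--         namespace = key.split(".")[0]
--         if namespace in deterministic_sources:
--             has_deterministic = True
--         else:
--             has_nondeterministic = True
--     if has_nondeterministic and has_deterministic:
--         return "hybrid"
--     if has_nondeterministic:
--         return "llm"
--     return "rule"
-- ===== SOURCE B (Python) =====
-- def resolve_provenance(when, deterministic_sources):
--     """Classify by set algebra on the finished namespace set instead of two loop flags."""
--     namespaces = {key.split(".")[0] for key in when}
--     deterministic = set(deterministic_sources)
--     if namespaces <= deterministic:
--         return "rule"
--     if namespaces.isdisjoint(deterministic):
--         return "llm"
--     return "hybrid"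
-- ===== Notes on version B (the rewrite author's own statement) =====
-- stated objective: simpler
-- what changed: B builds the set of namespaces with one comprehension and decides by subset/disjointness tests on the finished set, instead of A's per-key loop maintaining two boolean flags and a flag-combination decision.
import Mathlib
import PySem

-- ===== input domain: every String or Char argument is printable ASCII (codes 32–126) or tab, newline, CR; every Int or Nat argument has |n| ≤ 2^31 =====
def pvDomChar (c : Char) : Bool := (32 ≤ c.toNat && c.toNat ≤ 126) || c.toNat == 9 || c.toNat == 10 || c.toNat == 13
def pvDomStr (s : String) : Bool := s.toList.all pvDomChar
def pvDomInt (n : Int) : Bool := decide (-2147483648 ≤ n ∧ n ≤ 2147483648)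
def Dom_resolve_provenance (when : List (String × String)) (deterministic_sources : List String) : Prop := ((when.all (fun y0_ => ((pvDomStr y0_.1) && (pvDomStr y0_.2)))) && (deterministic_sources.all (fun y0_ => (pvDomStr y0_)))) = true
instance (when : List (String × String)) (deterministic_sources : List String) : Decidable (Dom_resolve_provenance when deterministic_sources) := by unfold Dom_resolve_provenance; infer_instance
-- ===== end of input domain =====

-- B replaces A's two boolean loop flags by set algebra (subset / disjointness tests
-- on the set of namespaces built up front); objective: simpler.


-- ===== PORT A =====
-- key.split(".")[0]: split? with sep "." is always `some` of a nonempty list,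
-- so the Python [0] never raises and getD/headD are exact.
def pvNamespace (key : String) : String := ((PySem.Str.split? key ".").getD []).headD ""

-- A iterates over the dict's keys maintaining two boolean flags, then decides from them.
def resolve_provenance (when : List (String × String)) (deterministic_sources : List String) : String :=
  let st := when.foldl
    (fun (st : Bool × Bool) kv =>
      if deterministic_sources.contains (pvNamespace kv.1) then (true, st.2) else (st.1, true))
    (false, false)
  if st.2 && st.1 then "hybrid"
  else if st.2 then "llm"
  else "rule"

-- ===== PORT B =====
-- B builds the namespace set once, then classifies by subset / disjointness tests.
def resolve_provenance_alt (when : List (String × String)) (deterministic_sources : List String) : String :=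
  let namespaces : PySem.Set String :=
    PySem.Set.ofList (when.map (fun kv => pvNamespace kv.1))
  let deterministic : PySem.Set String := PySem.Set.ofList deterministic_sources
  if PySem.Set.issubset namespaces deterministic then "rule"
  else if PySem.Set.isdisjoint namespaces deterministic then "llm"
  else "hybrid"

-- ===== PRECONDITION & SPEC =====
def Spec_resolve_provenance (when : List (String × String)) (deterministic_sources : List String) (out : String) : Prop := out = resolve_provenance_alt when deterministic_sources
instance (when : List (String × String)) (deterministic_sources : List String) (out : String) : Decidable (Spec_resolve_provenance when deterministic_sources out) := by unfold Spec_resolve_provenance; infer_instance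

-- ===== CLAIM (what is proved, stated in full; the proofs are below) =====
def Claim_equal_resolve_provenance : Prop := ∀ (when : List (String × String)) (deterministic_sources : List String), Dom_resolve_provenance when deterministic_sources → Spec_resolve_provenance when deterministic_sources (resolve_provenance when deterministic_sources)

-- ===== LEMMAS AND PROOFS =====

-- A's loop, characterised: the two flags become "some element satisfies p" and
-- "some element does not", for any test p.
theorem fold_flags {α : Type} (p : α → Bool) (l : List α) (a b : Bool) :
    l.foldl (fun (st : Bool × Bool) x => if p x then (true, st.2) else (st.1, true)) (a, b)
      = (a || l.any p, b || l.any (fun x => !p x)) := by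
  induction l generalizing a b with
  | nil => simp
  | cons x t ih => cases h : p x <;> simp [h, ih]

theorem resolve_provenance_eq_alt (when : List (String × String)) (ds : List String) :
    resolve_provenance when ds = resolve_provenance_alt when ds := by
  have hsub : PySem.Set.issubset
      (PySem.Set.ofList (when.map (fun kv => pvNamespace kv.1)))
      (PySem.Set.ofList ds)
      = when.all (fun kv => ds.contains (pvNamespace kv.1)) := by
    rcases h : when.all (fun kv => ds.contains (pvNamespace kv.1)) with _ | _
    · rw [Bool.eq_false_iff]
      intro hs
      rw [PySem.Set.issubset_iff] at hs
      rw [Bool.eq_false_iff] at h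
      apply h
      rw [List.all_eq_true]
      intro kv hkv
      have := hs _ (by
        rw [PySem.Set.mem_ofList, List.mem_map]
        exact ⟨kv, hkv, rfl⟩)
      rw [PySem.Set.mem_ofList] at this
      simpa using this
    · rw [PySem.Set.issubset_iff]
      intro x hx
      rw [PySem.Set.mem_ofList, List.mem_map] at hx
      obtain ⟨kv, hkv, rfl⟩ := hx
      rw [List.all_eq_true] at h
      have := h kv hkv
      rw [PySem.Set.mem_ofList]
      simpa using this
  have hdisj : PySem.Set.isdisjoint
      (PySem.Set.ofList (when.map (fun kv => pvNamespace kv.1)))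
      (PySem.Set.ofList ds)
      = when.all (fun kv => !ds.contains (pvNamespace kv.1)) := by
    rcases h : when.all (fun kv => !ds.contains (pvNamespace kv.1)) with _ | _
    · rw [Bool.eq_false_iff]
      intro hs
      rw [PySem.Set.isdisjoint_iff] at hs
      rw [Bool.eq_false_iff] at h
      apply h
      rw [List.all_eq_true]
      intro kv hkv
      have := hs _ (by
        rw [PySem.Set.mem_ofList, List.mem_map]
        exact ⟨kv, hkv, rfl⟩)
      rw [PySem.Set.mem_ofList] at this
      simpa using this
    · rw [PySem.Set.isdisjoint_iff]
      intro x hx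
      rw [PySem.Set.mem_ofList, List.mem_map] at hx
      obtain ⟨kv, hkv, rfl⟩ := hx
      rw [List.all_eq_true] at h
      have := h kv hkv
      rw [PySem.Set.mem_ofList]
      simpa using this
  unfold resolve_provenance resolve_provenance_alt
  rw [fold_flags]
  dsimp only
  have hall1 : when.all (fun kv => ds.contains (pvNamespace kv.1))
      = !when.any (fun x => !ds.contains (pvNamespace x.1)) := by
    rw [List.all_eq_not_any_not]
  have hall2 : when.all (fun kv => !ds.contains (pvNamespace kv.1))
      = !when.any (fun kv => ds.contains (pvNamespace kv.1)) := by
    rw [List.all_eq_not_any_not]; simp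
  rw [hsub, hdisj, hall1, hall2]
  cases hp : when.any (fun kv => ds.contains (pvNamespace kv.1)) <;>
  cases hn : when.any (fun x => !ds.contains (pvNamespace x.1)) <;> simp

-- ===== VERDICT (by name: the statement is the Claim_ definition above) =====
theorem resolve_provenance_spec : Claim_equal_resolve_provenance := by
  intro when ds _
  exact resolve_provenance_eq_alt when ds
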